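-- pv_equiv track=rewrite | github.com/Komanawa-Solutions-Ltd/SLMACC-2020-CSRA-FARM | BS_work/SWG/SWG_Final.py | streak_count
-- ===== SOURCE A (Python) =====
-- def streak_count(in_dry_days):
--     # finds the streaks of dry and wet days within the data
--
--     out_ind_streak_vals = []
--     out_streak_lens = []
--     out_streak_lens_flag = []
--
--     start_flag = in_dry_days[0]
--     count = 0
--     for day_data in in_dry_days:
--         if day_data == start_flag:
--             out_ind_streak_vals.append(count)
--             count += 1
--         else:
--             out_ind_streak_vals.append(0)
--             out_streak_lens.append(count)
--             count = 1
--             if start_flag: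
--                 out_streak_lens_flag.append('Dry')
--             else:
--                 out_streak_lens_flag.append('Wet')
--             start_flag = day_data
--
--     return out_streak_lens, out_streak_lens_flag, out_ind_streak_vals
-- ===== SOURCE B (Python) =====
-- def streak_count(in_dry_days):
--     # two-phase: run-length encode first, then build all three outputs from the runs
--     runs = []
--     for x in in_dry_days:
--         if runs and runs[-1][0] == x:
--             runs[-1][1] += 1
--         else:
--             runs.append([x, 1])
--     out_ind_streak_vals = []
--     for _, n in runs:
--         out_ind_streak_vals.extend(range(n))
--     out_streak_lens = [n for _, n in runs[:-1]]
--     out_streak_lens_flag = ['Dry' if v else 'Wet' for v, _ in runs[:-1]]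
--     return out_streak_lens, out_streak_lens_flag, out_ind_streak_vals
-- ===== Notes on version B (the rewrite author's own statement) =====
-- stated objective: idiomatic
-- what changed: B first run-length encodes the list into (value, length) runs and then builds all three outputs from the runs (lengths and flags from runs[:-1], per-run 0..n-1 indices), instead of A's single pass that threads start_flag/count state and emits into three lists on the fly.
import Mathlib
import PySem

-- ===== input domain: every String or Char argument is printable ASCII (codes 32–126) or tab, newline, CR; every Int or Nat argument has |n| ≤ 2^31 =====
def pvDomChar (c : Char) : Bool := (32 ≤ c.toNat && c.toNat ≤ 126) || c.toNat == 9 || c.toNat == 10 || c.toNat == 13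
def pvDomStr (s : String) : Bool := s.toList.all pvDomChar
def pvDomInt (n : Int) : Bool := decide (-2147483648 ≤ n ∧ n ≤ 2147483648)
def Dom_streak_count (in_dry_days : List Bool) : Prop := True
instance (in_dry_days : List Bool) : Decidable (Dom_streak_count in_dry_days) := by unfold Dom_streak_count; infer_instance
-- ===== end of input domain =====

-- B re-decomposes A's single stateful pass as run-length-encode-then-build; return values agree on nonempty input (idiomatic objective).

-- ===== PORT A =====
-- loop body of A: state = (start_flag, count, out_ind_streak_vals, out_streak_lens, out_streak_lens_flag)
def stepA (s : Bool × Int × List Int × List Int × List String) (day_data : Bool) :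
    Bool × Int × List Int × List Int × List String :=
  let (start_flag, count, inds, lens, flags) := s
  if day_data == start_flag then
    (start_flag, count + 1, inds ++ [count], lens, flags)
  else
    (day_data, 1, inds ++ [0], lens ++ [count],
      flags ++ [if start_flag then "Dry" else "Wet"])

def streak_count (in_dry_days : List Bool) : List Int × List String × List Int :=
  match in_dry_days with
  | [] => ([], [], [])   -- in_dry_days[0] raises IndexError here; excluded by Pre_
  | h :: _ =>
    let st := in_dry_days.foldl stepA (h, 0, [], [], [])
    (st.2.2.2.1, st.2.2.2.2, st.2.2.1)

-- ===== PORT B =====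
-- B's run-length encoding loop: runs[-1][1] += 1 becomes dropLast ++ [(v, n+1)]
def runsB (xs : List Bool) : List (Bool × Int) :=
  xs.foldl (fun runs x =>
    match runs.getLast? with
    | some (v, n) => if v == x then runs.dropLast ++ [(v, n + 1)] else runs ++ [(x, 1)]
    | none => [(x, 1)]) []

def streak_count_alt (in_dry_days : List Bool) : List Int × List String × List Int :=
  let runs := runsB in_dry_days
  let out_ind := runs.foldl (fun acc p => acc ++ PySem.List.pyRange 0 p.2 1) []
  let front := runs.dropLast              -- runs[:-1]
  (front.map (fun p => p.2),
   front.map (fun p => if p.1 then "Dry" else "Wet"),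
   out_ind)

-- ===== PRECONDITION & SPEC =====
-- A raises IndexError on the empty list (it reads in_dry_days[0]); Pre_ excludes exactly that input.
def Pre_streak_count (in_dry_days : List Bool) : Prop := in_dry_days ≠ []
instance (in_dry_days : List Bool) : Decidable (Pre_streak_count in_dry_days) := by unfold Pre_streak_count; infer_instance
def pvWitness_streak_count : List Bool := [true, true, false, true]

def Spec_streak_count (in_dry_days : List Bool) (out : List Int × List String × List Int) : Prop := out = streak_count_alt in_dry_days
instance (in_dry_days : List Bool) (out : List Int × List String × List Int) : Decidable (Spec_streak_count in_dry_days out) := by unfold Spec_streak_count; infer_instance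

-- ===== CLAIM (what is proved, stated in full; the proofs are below) =====
def Claim_equal_streak_count : Prop := ∀ (in_dry_days : List Bool), Dom_streak_count in_dry_days → Pre_streak_count in_dry_days → Spec_streak_count in_dry_days (streak_count in_dry_days)

-- ===== LEMMAS AND PROOFS =====

-- head-recursive characterisation of the run-length encoding
def rleAux (x : Bool) (n : Int) : List Bool → List (Bool × Int)
  | [] => [(x, n)]
  | y :: ys => if y = x then rleAux x (n + 1) ys else (x, n) :: rleAux y 1 ys

-- the individual-streak indices A emits, given the running count c entering the first run
def indsOf (c : Int) : List (Bool × Int) → List Int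
  | [] => []
  | (_, n) :: rest => PySem.List.pyRange c n 1 ++ rest.flatMap (fun p => PySem.List.pyRange 0 p.2 1)

theorem rleAux_shape (ys : List Bool) (x : Bool) (n : Int) :
    ∃ k rest, rleAux x n ys = (x, k) :: rest ∧ n ≤ k := by
  induction ys generalizing x n with
  | nil => exact ⟨n, [], rfl, le_refl n⟩
  | cons y ys ih =>
    by_cases h : y = x
    · obtain ⟨k, rest, he, hk⟩ := ih x (n + 1)
      exact ⟨k, rest, by simp [rleAux, h, he], by omega⟩
    · obtain ⟨k, rest, he, hk⟩ := ih y 1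
      exact ⟨n, rleAux y 1 ys, by simp [rleAux, h], le_refl n⟩

theorem rleAux_ne_nil (ys : List Bool) (x : Bool) (n : Int) : rleAux x n ys ≠ [] := by
  obtain ⟨k, rest, he, _⟩ := rleAux_shape ys x n
  simp [he]

theorem foldB_runs (ys : List Bool) (pre : List (Bool × Int)) (x : Bool) (n : Int) :
    List.foldl (fun runs x =>
      match runs.getLast? with
      | some (v, n) => if v == x then runs.dropLast ++ [(v, n + 1)] else runs ++ [(x, 1)]
      | none => [(x, 1)]) (pre ++ [(x, n)]) ys = pre ++ rleAux x n ys := by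
  induction ys generalizing pre x n with
  | nil => simp [rleAux]
  | cons y ys ih =>
    by_cases h : x = y
    · subst h
      simpa [rleAux, List.foldl_cons] using ih pre x (n + 1)
    · have h2 : ¬ y = x := fun hh => h hh.symm
      have := ih (pre ++ [(x, n)]) y 1
      simpa [rleAux, h, h2, List.foldl_cons, List.append_assoc] using this

theorem runsB_eq (x : Bool) (xs : List Bool) : runsB (x :: xs) = rleAux x 1 xs := by
  have := foldB_runs xs [] x 1
  simpa [runsB, List.foldl_cons] using this

-- main invariant: A's loop, started in any state, is determined by the runs of the remaining input
theorem foldA_main (xs : List Bool) (sf : Bool) (c : Int)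
    (inds lens : List Int) (flags : List String) :
    List.foldl stepA (sf, c, inds, lens, flags) xs =
      ((rleAux sf c xs).getLast!.1, (rleAux sf c xs).getLast!.2,
       inds ++ indsOf c (rleAux sf c xs),
       lens ++ ((rleAux sf c xs).dropLast).map (fun p => p.2),
       flags ++ ((rleAux sf c xs).dropLast).map (fun p => if p.1 then "Dry" else "Wet")) := by
  induction xs generalizing sf c inds lens flags with
  | nil => simp [rleAux, indsOf, PySem.List.pyRange_one_eq_nil (le_refl c)]
  | cons x xs ih =>
    by_cases h : x = sf
    · subst h
      have step : List.foldl stepA (x, c, inds, lens, flags) (x :: xs) =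
          List.foldl stepA (x, c + 1, inds ++ [c], lens, flags) xs := by
        simp [List.foldl_cons, stepA]
      rw [step, ih]
      obtain ⟨k, rest, he, hk⟩ := rleAux_shape xs x (c + 1)
      have hr : rleAux x c (x :: xs) = rleAux x (c + 1) xs := by simp [rleAux]
      have hcons : PySem.List.pyRange c k 1 = c :: PySem.List.pyRange (c + 1) k 1 :=
        PySem.List.pyRange_one_cons (by omega)
      simp [hr, he, indsOf, hcons]
    · have step : List.foldl stepA (sf, c, inds, lens, flags) (x :: xs) =
          List.foldl stepA (x, 1, inds ++ [0], lens ++ [c],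
            flags ++ [if sf then "Dry" else "Wet"]) xs := by
        simp [List.foldl_cons, stepA, h]
      rw [step, ih]
      obtain ⟨k, rest, he, hk⟩ := rleAux_shape xs x 1
      have hr : rleAux sf c (x :: xs) = (sf, c) :: rleAux x 1 xs := by simp [rleAux, h]
      have hne : rleAux x 1 xs ≠ [] := rleAux_ne_nil xs x 1
      have hzero : PySem.List.pyRange 0 k 1 = 0 :: PySem.List.pyRange 1 k 1 :=
        PySem.List.pyRange_one_cons (by omega)
      have hself : PySem.List.pyRange c c 1 = [] := PySem.List.pyRange_one_eq_nil (le_refl c)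
      simp [hr, indsOf, hself, he, hzero]

theorem foldB_inds (rs : List (Bool × Int)) (acc : List Int) :
    List.foldl (fun acc p => acc ++ PySem.List.pyRange 0 p.2 1) acc rs =
      acc ++ rs.flatMap (fun p => PySem.List.pyRange 0 p.2 1) := by
  induction rs generalizing acc with
  | nil => simp
  | cons r rs ih => simp [List.foldl_cons, ih, List.flatMap_cons, List.append_assoc]

theorem indsOf_zero (rs : List (Bool × Int)) :
    indsOf 0 rs = rs.flatMap (fun p => PySem.List.pyRange 0 p.2 1) := by
  cases rs with
  | nil => simp [indsOf]
  | cons r rs => cases r; simp [indsOf, List.flatMap_cons]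

-- ===== VERDICT (by name: the statement is the Claim_ definition above) =====
theorem streak_count_spec : Claim_equal_streak_count := by
  intro xs _ hpre
  unfold Spec_streak_count
  cases xs with
  | nil => exact absurd rfl hpre
  | cons h t =>
    have hr : rleAux h 0 (h :: t) = rleAux h 1 t := by simp [rleAux]
    rw [show streak_count (h :: t) =
        (let st := List.foldl stepA (h, 0, [], [], []) (h :: t)
         (st.2.2.2.1, st.2.2.2.2, st.2.2.1)) from rfl]
    rw [foldA_main]
    simp only [streak_count_alt, runsB_eq, foldB_inds, hr, indsOf_zero, List.nil_append]
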